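-- pv_equiv track=rewrite | github.com/JustinHoyt/interview-practice | JustinHackerRank/set_intersection.py | max_intersection
-- ===== SOURCE A (Python) =====
-- def max_intersection(sets):
--     size = len(sets)
--     if size <= 1:
--         return -1
--     memo = {(0,0): sets[0]}
--     for i in range(1, size):
--         memo[(0,i)] = memo[(0,i-1)].intersection(sets[i])
--     memo[(size-1,size-1)] = sets[size-1]
--     for i in range(size-1, -1, -1):
--         memo[(i-1,size-1)] = memo[(i, size-1)].intersection(sets[i-1])
--
--     max_intersection = 0
--     best_ignored_intersection = 0
--     for i in range(size):
--         temp_intersection = set()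
--         if i == 0:
--             temp_intersection = memo[(1, size-1)]
--         elif i == size-1:
--             temp_intersection = memo[(0, size-2)]
--         else:
--             temp_intersection = memo[(0, i-1)].intersection(memo[(i+1, size-1)])
--         if len(temp_intersection) > max_intersection:
--             max_intersection = len(temp_intersection)
--             best_ignored_intersection = i
--     return best_ignored_intersection
-- ===== SOURCE B (Python) =====
-- def max_intersection(sets):
--     if len(sets) <= 1:
--         return -1
--     best_size = 0
--     best_index = 0
--     for i in range(len(sets)):
--         others = sets[:i] + sets[i+1:]
--         inter = others[0]
--         for s in others[1:]:
--             inter = inter.intersection(s)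
--         if len(inter) > best_size:
--             best_size = len(inter)
--             best_index = i
--     return best_index
-- ===== Notes on version B (the rewrite author's own statement) =====
-- stated objective: simpler
-- what changed: B drops A's prefix/suffix memo dictionary and, for each index i, folds set.intersection directly over all the other sets, tracking the best size with a strict '>' so ties keep the lowest index.
import Mathlib
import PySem

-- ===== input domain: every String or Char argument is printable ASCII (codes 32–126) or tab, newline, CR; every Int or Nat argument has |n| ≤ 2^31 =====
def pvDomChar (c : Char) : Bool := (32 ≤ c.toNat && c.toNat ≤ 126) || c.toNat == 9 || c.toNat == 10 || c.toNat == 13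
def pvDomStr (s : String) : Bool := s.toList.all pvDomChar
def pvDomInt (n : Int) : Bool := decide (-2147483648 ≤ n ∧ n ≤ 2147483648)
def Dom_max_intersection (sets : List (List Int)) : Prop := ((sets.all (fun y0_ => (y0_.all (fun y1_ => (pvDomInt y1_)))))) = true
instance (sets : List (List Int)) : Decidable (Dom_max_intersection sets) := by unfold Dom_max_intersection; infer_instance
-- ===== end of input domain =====

-- B replaces A's prefix/suffix memo dictionary by a direct per-index fold of set.intersection
-- over the remaining sets (simpler, not faster). Equivalence is about the return value.


-- ===== PORT A =====
-- Python's a.intersection(b): the elements common to a and b, as a set. Only the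
-- CARDINALITY of intersections reaches the returned index, so the model keeps a's
-- order; exact on inputs satisfying Pre_ (inner lists without duplicates = real sets).
def pyInter (a b : List Int) : List Int := a.filter (fun x => decide (x ∈ b))

def max_intersection (sets : List (List Int)) : Int :=
  let size : Int := sets.length
  if size ≤ 1 then -1 else
    -- memo = {(0,0): sets[0]}; every dict key read below is always present, so getD's
    -- default [] is never produced (no KeyError is reachable), and every sets[...]
    -- index is in range (sets[-1] in the second loop wraps, as in Python).
    let memo : PySem.Dict (Int × Int) (List Int) :=
      PySem.Dict.ofList [(((0 : Int), (0 : Int)), PySem.List.pyGetD sets 0 [])]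
    let memo := (PySem.List.pyRange 1 size 1).foldl (fun m i =>
      m.insert (0, i) (pyInter (m.getD (0, i - 1) []) (PySem.List.pyGetD sets i []))) memo
    let memo := memo.insert (size - 1, size - 1) (PySem.List.pyGetD sets (size - 1) [])
    let memo := (PySem.List.pyRange (size - 1) (-1) (-1)).foldl (fun m i =>
      m.insert (i - 1, size - 1) (pyInter (m.getD (i, size - 1) []) (PySem.List.pyGetD sets (i - 1) []))) memo
    let res := (PySem.List.pyRange 0 size 1).foldl (fun (st : Int × Int) i =>
      let temp : List Int :=
        if i == 0 then memo.getD (1, size - 1) []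
        else if i == size - 1 then memo.getD (0, size - 2) []
        else pyInter (memo.getD (0, i - 1) []) (memo.getD (i + 1, size - 1) [])
      if (temp.length : Int) > st.1 then ((temp.length : Int), i) else st) ((0 : Int), (0 : Int))
    res.2

-- ===== PORT B =====
def max_intersection_alt (sets : List (List Int)) : Int :=
  if (sets.length : Int) ≤ 1 then -1 else
    let res := (PySem.List.pyRange 0 (sets.length : Int) 1).foldl (fun (st : Int × Int) i =>
      let others := PySem.List.slice sets none (some i) ++ PySem.List.slice sets (some (i + 1)) none
      -- others[0] / others[1:]: others is nonempty here since len(sets) ≥ 2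
      let inter : List Int := match others with
        | [] => []
        | h :: t => t.foldl pyInter h
      if (inter.length : Int) > st.1 then ((inter.length : Int), i) else st) ((0 : Int), (0 : Int))
    res.2

-- ===== PRECONDITION & SPEC =====
-- Pre_ requires each inner list to have no duplicate elements: the Python parameter is a
-- list of SETS, and under the type convention a Python set is modelled by the list of its
-- DISTINCT elements, so a list with a duplicate represents no Python input at all.
def Pre_max_intersection (sets : List (List Int)) : Prop := ∀ l ∈ sets, l.Nodup
instance (sets : List (List Int)) : Decidable (Pre_max_intersection sets) := by unfold Pre_max_intersection; infer_instance
def pvWitness_max_intersection : List (List Int) := [[1, 2], [2, 3], [2]]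
def Spec_max_intersection (sets : List (List Int)) (out : Int) : Prop := out = max_intersection_alt sets
instance (sets : List (List Int)) (out : Int) : Decidable (Spec_max_intersection sets out) := by unfold Spec_max_intersection; infer_instance

-- ===== CLAIM (what is proved, stated in full; the proofs are below) =====
def Claim_equal_max_intersection : Prop := ∀ (sets : List (List Int)), Dom_max_intersection sets → Pre_max_intersection sets → Spec_max_intersection sets (max_intersection sets)

-- ===== LEMMAS AND PROOFS =====

/-- Fold of `pyInter` over a list of sets, starting from the first one (`[]` if none). -/
def chainOf (l : List (List Int)) : List Int :=
  match l with
  | [] => []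
  | h :: t => t.foldl pyInter h

/-- A's prefix intersections: `memo[(0,k)]`. -/
def Pfun (sets : List (List Int)) (k : Nat) : List Int := chainOf (sets.take (k + 1))

/-- A's suffix intersections: `memo[(k, size-1)]`. -/
def Sfun (sets : List (List Int)) (k : Nat) : List Int := chainOf ((sets.drop k).reverse)

-- A's memo tables, named for the proofs (definitionally the terms in `max_intersection`).
def pvMemo0 (sets : List (List Int)) : PySem.Dict (Int × Int) (List Int) :=
  PySem.Dict.ofList [(((0 : Int), (0 : Int)), PySem.List.pyGetD sets 0 [])]
def pvMemo1 (sets : List (List Int)) : PySem.Dict (Int × Int) (List Int) :=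
  (PySem.List.pyRange 1 (sets.length : Int) 1).foldl (fun m i =>
    m.insert (0, i) (pyInter (m.getD (0, i - 1) []) (PySem.List.pyGetD sets i []))) (pvMemo0 sets)
def pvMemo2 (sets : List (List Int)) : PySem.Dict (Int × Int) (List Int) :=
  (pvMemo1 sets).insert ((sets.length : Int) - 1, (sets.length : Int) - 1)
    (PySem.List.pyGetD sets ((sets.length : Int) - 1) [])
def pvMemo4 (sets : List (List Int)) : PySem.Dict (Int × Int) (List Int) :=
  (PySem.List.pyRange ((sets.length : Int) - 1) (-1) (-1)).foldl (fun m i =>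
    m.insert (i - 1, (sets.length : Int) - 1)
      (pyInter (m.getD (i, (sets.length : Int) - 1) []) (PySem.List.pyGetD sets (i - 1) []))) (pvMemo2 sets)

lemma chain_filter (t : List (List Int)) (h : List Int) :
    t.foldl pyInter h = h.filter (fun x => decide (∀ s ∈ t, x ∈ s)) := by
  induction t generalizing h with
  | nil => simp
  | cons a t ih =>
      rw [List.foldl_cons, ih, pyInter, List.filter_filter]
      apply List.filter_congr
      intro x _
      rw [← Bool.decide_and, decide_eq_decide, List.forall_mem_cons]
      tauto

lemma mem_chainOf {l : List (List Int)} (hl : l ≠ []) (x : Int) :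
    x ∈ chainOf l ↔ ∀ s ∈ l, x ∈ s := by
  cases l with
  | nil => exact absurd rfl hl
  | cons h t => simp [chainOf, chain_filter, List.mem_filter]

lemma chainOf_append_singleton {l : List (List Int)} (hl : l ≠ []) (a : List Int) :
    chainOf (l ++ [a]) = pyInter (chainOf l) a := by
  cases l with
  | nil => exact absurd rfl hl
  | cons h t => simp [chainOf, List.foldl_append]

lemma nodup_chainOf {l : List (List Int)} (h : ∀ s ∈ l, s.Nodup) : (chainOf l).Nodup := by
  cases l with
  | nil => simp [chainOf]
  | cons a t =>
      show (t.foldl pyInter a).Nodup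
      rw [chain_filter]
      exact (h a (by simp)).filter _

lemma length_chainOf_congr {l₁ l₂ : List (List Int)} (h₁ : l₁ ≠ []) (h₂ : l₂ ≠ [])
    (hm : ∀ s, s ∈ l₁ ↔ s ∈ l₂) (hn : ∀ s ∈ l₁, s.Nodup) :
    (chainOf l₁).length = (chainOf l₂).length := by
  have hn₂ : ∀ s ∈ l₂, s.Nodup := fun s hs => hn s ((hm s).mpr hs)
  have hperm : (chainOf l₁).Perm (chainOf l₂) := by
    rw [List.perm_ext_iff_of_nodup (nodup_chainOf hn) (nodup_chainOf hn₂)]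
    intro a
    rw [mem_chainOf h₁, mem_chainOf h₂]
    constructor
    · intro hall s hs; exact hall s ((hm s).mpr hs)
    · intro hall s hs; exact hall s ((hm s).mp hs)
  exact hperm.length_eq

lemma middle_eq (l₁ l₂ : List (List Int)) (h₁ : l₁ ≠ []) (h₂ : l₂ ≠ []) :
    pyInter (chainOf l₁) (chainOf l₂.reverse) = chainOf (l₁ ++ l₂) := by
  cases l₁ with
  | nil => exact absurd rfl h₁
  | cons h t =>
      have h₂' : l₂.reverse ≠ [] := by simpa using h₂
      show pyInter (t.foldl pyInter h) _ = (t ++ l₂).foldl pyInter h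
      rw [chain_filter, chain_filter, pyInter, List.filter_filter]
      apply List.filter_congr
      intro x _
      rw [← Bool.decide_and, decide_eq_decide, List.forall_mem_append,
        mem_chainOf h₂' x]
      simp only [List.mem_reverse]
      tauto

lemma Pfun_succ (sets : List (List Int)) (k : Nat) (hk : k + 1 < sets.length) :
    Pfun sets (k + 1) = pyInter (Pfun sets k) (sets[k + 1]'hk) := by
  have htake : sets.take (k + 1 + 1) = sets.take (k + 1) ++ [sets[k + 1]'hk] := by
    rw [List.take_add_one]
    simp [List.getElem?_eq_getElem hk]
  have hne : sets.take (k + 1) ≠ [] := by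
    apply List.ne_nil_of_length_pos
    simp only [List.length_take]
    omega
  rw [Pfun, htake, chainOf_append_singleton hne]
  rfl

lemma Sfun_last (sets : List (List Int)) (h : 1 ≤ sets.length) :
    Sfun sets (sets.length - 1) = sets[sets.length - 1]'(by omega) := by
  have hd : sets.drop (sets.length - 1) = [sets[sets.length - 1]'(by omega)] := by
    rw [List.drop_eq_getElem_cons (by omega)]
    have h2 : sets.length - 1 + 1 = sets.length := by omega
    rw [h2, List.drop_length]
  rw [Sfun, hd]
  rfl

lemma Sfun_succ (sets : List (List Int)) (k : Nat) (hk : k + 1 < sets.length) :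
    Sfun sets k = pyInter (Sfun sets (k + 1)) (sets[k]'(by omega)) := by
  have hd : sets.drop k = sets[k]'(by omega) :: sets.drop (k + 1) := List.drop_eq_getElem_cons (by omega)
  have hne : (sets.drop (k + 1)).reverse ≠ [] := by
    apply List.ne_nil_of_length_pos
    simp only [List.length_reverse, List.length_drop]
    omega
  rw [Sfun, hd, List.reverse_cons, chainOf_append_singleton hne, Sfun]

lemma loop1_run (sets : List (List Int)) (k : Nat) :
    ∀ (i : Int) (d : PySem.Dict (Int × Int) (List Int)),
    1 ≤ i → ((sets.length : Int) - i).toNat = k →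
    d.getD (0, i - 1) [] = Pfun sets (i - 1).toNat →
    ∀ q : Int × Int,
    ((PySem.List.pyRange i (sets.length : Int) 1).foldl (fun m j =>
        m.insert (0, j) (pyInter (m.getD (0, j - 1) []) (PySem.List.pyGetD sets j []))) d).getD q []
      = if q.1 = 0 ∧ i ≤ q.2 ∧ q.2 ≤ (sets.length : Int) - 1 then Pfun sets q.2.toNat
        else d.getD q [] := by
  induction k with
  | zero =>
      intro i d h1 hk hd q
      rw [PySem.List.pyRange_one_eq_nil (by omega), List.foldl_nil,
        if_neg (by rintro ⟨_, h2, h3⟩; omega)]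
  | succ k ih =>
      intro i d h1 hk hd q
      have hiN : i < (sets.length : Int) := by omega
      rw [PySem.List.pyRange_one_cons hiN, List.foldl_cons]
      have hget : PySem.List.pyGetD sets i [] = sets[i.toNat]'(by omega) :=
        PySem.List.pyGetD_eq_getElem sets [] (by omega) hiN
      have hv : pyInter (d.getD (0, i - 1) []) (PySem.List.pyGetD sets i []) = Pfun sets i.toNat := by
        rw [hd, hget]
        obtain ⟨m, hm⟩ : ∃ m, i.toNat = m + 1 := ⟨i.toNat - 1, by omega⟩
        have hm' : (i - 1).toNat = m := by omega
        rw [hm']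
        simp only [hm]
        exact (Pfun_succ sets m (by omega)).symm
      rw [ih (i + 1) _ (by omega) (by omega)
        (by rw [show i + 1 - 1 = i by ring, PySem.Dict.getD_insert_self, hv])]
      rw [PySem.Dict.getD_insert]
      obtain ⟨q1, q2⟩ := q
      by_cases hq : q1 = 0 ∧ q2 = i
      · obtain ⟨e1, e2⟩ := hq
        subst e1; subst e2
        rw [if_neg (by rintro ⟨_, h2, _⟩; omega), if_pos rfl, hv,
          if_pos ⟨rfl, by omega, by omega⟩]
      · have hne : ((q1, q2) : Int × Int) ≠ (0, i) := by
          intro h; rw [Prod.mk.injEq] at h; exact hq h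
        rw [if_neg hne]
        by_cases hc : q1 = 0 ∧ i ≤ q2 ∧ q2 ≤ (sets.length : Int) - 1
        · have hq2i : q2 ≠ i := fun h => hq ⟨hc.1, h⟩
          rw [if_pos ⟨hc.1, by omega, hc.2.2⟩, if_pos hc]
        · rw [if_neg (by rintro ⟨a, b, c⟩; exact hc ⟨a, by omega, c⟩), if_neg hc]

lemma loop2_run (sets : List (List Int)) (k : Nat) :
    ∀ (i : Int) (d : PySem.Dict (Int × Int) (List Int)),
    i.toNat = k → 0 ≤ i → i ≤ (sets.length : Int) - 1 →
    d.getD (i, (sets.length : Int) - 1) [] = Sfun sets i.toNat →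
    ∀ q : Int × Int,
    ((PySem.List.pyRange i (-1) (-1)).foldl (fun m j =>
        m.insert (j - 1, (sets.length : Int) - 1)
          (pyInter (m.getD (j, (sets.length : Int) - 1) []) (PySem.List.pyGetD sets (j - 1) []))) d).getD q []
      = if q.2 = (sets.length : Int) - 1 ∧ -1 ≤ q.1 ∧ q.1 < i then
          (if 0 ≤ q.1 then Sfun sets q.1.toNat
           else pyInter (Sfun sets 0) (PySem.List.pyGetD sets (-1) []))
        else d.getD q [] := by
  induction k with
  | zero =>
      intro i d hk h0 hN hd q
      have hi0 : i = 0 := by omega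
      subst hi0
      rw [PySem.List.pyRange_neg_one_cons (by omega), PySem.List.pyRange_neg_one_eq_nil (by omega),
        List.foldl_cons, List.foldl_nil, PySem.Dict.getD_insert]
      have hd0 : d.getD (0, (sets.length : Int) - 1) [] = Sfun sets 0 := by simpa using hd
      obtain ⟨q1, q2⟩ := q
      by_cases hq : q1 = -1 ∧ q2 = (sets.length : Int) - 1
      · obtain ⟨e1, e2⟩ := hq
        subst e1; subst e2
        rw [if_pos (by rw [Prod.mk.injEq]; norm_num), hd0,
          if_pos ⟨rfl, by norm_num, by norm_num⟩, if_neg (by norm_num)]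
        norm_num
      · have hne : ((q1, q2) : Int × Int) ≠ (0 - 1, (sets.length : Int) - 1) := by
          intro h; rw [Prod.mk.injEq] at h; exact hq ⟨by omega, h.2⟩
        rw [if_neg hne, if_neg (by rintro ⟨a, b, c⟩; exact hq ⟨by omega, a⟩)]
  | succ k ih =>
      intro i d hk h0 hiN hd q
      have h1 : 1 ≤ i := by omega
      rw [PySem.List.pyRange_neg_one_cons (by omega), List.foldl_cons]
      have hget : PySem.List.pyGetD sets (i - 1) [] = sets[(i - 1).toNat]'(by omega) :=
        PySem.List.pyGetD_eq_getElem sets [] (by omega) (by omega)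
      have hv : pyInter (d.getD (i, (sets.length : Int) - 1) []) (PySem.List.pyGetD sets (i - 1) [])
          = Sfun sets (i - 1).toNat := by
        rw [hd, hget]
        obtain ⟨m, hm⟩ : ∃ m, i.toNat = m + 1 := ⟨i.toNat - 1, by omega⟩
        have hm' : (i - 1).toNat = m := by omega
        simp only [hm', hm]
        exact (Sfun_succ sets m (by omega)).symm
      rw [ih (i - 1) _ (by omega) (by omega) (by omega)
        (by rw [PySem.Dict.getD_insert_self, hv])]
      rw [PySem.Dict.getD_insert]
      obtain ⟨q1, q2⟩ := q
      by_cases hq : q1 = i - 1 ∧ q2 = (sets.length : Int) - 1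
      · obtain ⟨e1, e2⟩ := hq
        subst e1; subst e2
        rw [if_neg (by rintro ⟨_, _, h⟩; omega), if_pos rfl, hv,
          if_pos ⟨rfl, by omega, by omega⟩, if_pos (by omega)]
      · have hne : ((q1, q2) : Int × Int) ≠ (i - 1, (sets.length : Int) - 1) := by
          intro h; rw [Prod.mk.injEq] at h; exact hq h
        rw [if_neg hne]
        by_cases hc : q2 = (sets.length : Int) - 1 ∧ -1 ≤ q1 ∧ q1 < i
        · have hq1i : q1 ≠ i - 1 := fun h => hq ⟨h, hc.1⟩
          rw [if_pos ⟨hc.1, hc.2.1, by omega⟩, if_pos hc]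
        · rw [if_neg (by rintro ⟨a, b, c⟩; exact hc ⟨a, b, by omega⟩), if_neg hc]

lemma memo0_base (sets : List (List Int)) (h : 1 ≤ sets.length) :
    (pvMemo0 sets).getD (0, 0) [] = Pfun sets 0 := by
  have h0 : (pvMemo0 sets).getD (0, 0) [] = PySem.List.pyGetD sets 0 [] := rfl
  cases sets with
  | nil => simp at h
  | cons a t =>
      rw [h0, PySem.List.pyGetD_eq_getElem (a :: t) [] (by omega) (by simp)]
      rfl

lemma memo4_spec (sets : List (List Int)) (hn : 2 ≤ sets.length) :
    (∀ j : Int, 0 ≤ j → j ≤ (sets.length : Int) - 2 →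
        (pvMemo4 sets).getD (0, j) [] = Pfun sets j.toNat) ∧
    (∀ j : Int, 1 ≤ j → j ≤ (sets.length : Int) - 1 →
        (pvMemo4 sets).getD (j, (sets.length : Int) - 1) [] = Sfun sets j.toNat) := by
  have hN : (2 : Int) ≤ (sets.length : Int) := by exact_mod_cast hn
  have h1 : ∀ q : Int × Int, (pvMemo1 sets).getD q [] =
      if q.1 = 0 ∧ 1 ≤ q.2 ∧ q.2 ≤ (sets.length : Int) - 1 then Pfun sets q.2.toNat
      else (pvMemo0 sets).getD q [] := by
    intro q
    exact loop1_run sets ((sets.length : Int) - 1).toNat 1 (pvMemo0 sets) (by omega) (by omega)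
      (by rw [show (1 : Int) - 1 = 0 by ring]; simpa using memo0_base sets (by omega)) q
  have h2self : (pvMemo2 sets).getD ((sets.length : Int) - 1, (sets.length : Int) - 1) []
      = Sfun sets ((sets.length : Int) - 1).toNat := by
    rw [pvMemo2, PySem.Dict.getD_insert_self,
      PySem.List.pyGetD_eq_getElem sets [] (by omega) (by omega)]
    have ht : ((sets.length : Int) - 1).toNat = sets.length - 1 := by omega
    simp only [ht]
    exact (Sfun_last sets (by omega)).symm
  have h4 : ∀ q : Int × Int, (pvMemo4 sets).getD q [] =
      if q.2 = (sets.length : Int) - 1 ∧ -1 ≤ q.1 ∧ q.1 < (sets.length : Int) - 1 then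
        (if 0 ≤ q.1 then Sfun sets q.1.toNat
         else pyInter (Sfun sets 0) (PySem.List.pyGetD sets (-1) []))
      else (pvMemo2 sets).getD q [] := by
    intro q
    exact loop2_run sets ((sets.length : Int) - 1).toNat ((sets.length : Int) - 1) (pvMemo2 sets)
      rfl (by omega) (by omega) h2self q
  constructor
  · intro j hj0 hj2
    rw [h4, if_neg (by rintro ⟨hx, _⟩; omega)]
    rw [pvMemo2, PySem.Dict.getD_insert,
      if_neg (by intro h; rw [Prod.mk.injEq] at h; omega)]
    rw [h1]
    by_cases hj1 : 1 ≤ j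
    · rw [if_pos ⟨rfl, hj1, by omega⟩]
    · have hj : j = 0 := by omega
      subst hj
      rw [if_neg (by rintro ⟨_, h, _⟩; omega)]
      exact memo0_base sets (by omega)
  · intro j hj1 hjN
    rw [h4]
    by_cases hjlt : j < (sets.length : Int) - 1
    · rw [if_pos ⟨rfl, by omega, hjlt⟩, if_pos (by omega)]
    · have hj : j = (sets.length : Int) - 1 := by omega
      subst hj
      rw [if_neg (by rintro ⟨_, _, h⟩; omega)]
      exact h2self

lemma step_eq (sets : List (List Int)) (hn : 2 ≤ sets.length)
    (hpre : ∀ l ∈ sets, l.Nodup) (i : Int) (h0 : 0 ≤ i) (hiN : i < (sets.length : Int)) :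
    (if i == 0 then (pvMemo4 sets).getD (1, (sets.length : Int) - 1) []
     else if i == (sets.length : Int) - 1 then (pvMemo4 sets).getD (0, (sets.length : Int) - 2) []
     else pyInter ((pvMemo4 sets).getD (0, i - 1) [])
       ((pvMemo4 sets).getD (i + 1, (sets.length : Int) - 1) [])).length
    = (match PySem.List.slice sets none (some i) ++ PySem.List.slice sets (some (i + 1)) none with
       | [] => ([] : List Int)
       | h :: t => t.foldl pyInter h).length := by
  have hN : (2 : Int) ≤ (sets.length : Int) := by exact_mod_cast hn
  obtain ⟨hP, hS⟩ := memo4_spec sets hn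
  have hsl : PySem.List.slice sets none (some i) ++ PySem.List.slice sets (some (i + 1)) none
      = sets.take i.toNat ++ sets.drop (i.toNat + 1) := by
    rw [PySem.List.slice_to sets h0, PySem.List.slice_from sets (by omega),
      show (i + 1).toNat = i.toNat + 1 by omega]
  have hmatch : (match PySem.List.slice sets none (some i) ++ PySem.List.slice sets (some (i + 1)) none with
       | [] => ([] : List Int)
       | h :: t => t.foldl pyInter h)
      = chainOf (sets.take i.toNat ++ sets.drop (i.toNat + 1)) := by
    rw [hsl]; rfl
  rw [hmatch]
  by_cases hi0 : i = 0
  · subst hi0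
    rw [if_pos (by decide), hS 1 le_rfl (by omega)]
    show (Sfun sets 1).length = _
    rw [Sfun]
    simp only [Int.toNat_zero, List.take_zero, List.nil_append, Nat.zero_add]
    apply length_chainOf_congr
    · apply List.ne_nil_of_length_pos
      simp only [List.length_reverse, List.length_drop]
      omega
    · apply List.ne_nil_of_length_pos
      simp only [List.length_drop]
      omega
    · intro s; exact List.mem_reverse
    · intro s hs
      exact hpre s (List.mem_of_mem_drop (List.mem_reverse.mp hs))
  · rw [if_neg (by simpa using hi0)]
    by_cases hil : i = (sets.length : Int) - 1
    · subst hil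
      rw [if_pos (by simp), hP ((sets.length : Int) - 2) (by omega) le_rfl]
      have hdrop : sets.drop (((sets.length : Int) - 1).toNat + 1) = [] :=
        List.drop_eq_nil_of_le (by omega)
      rw [hdrop, List.append_nil]
      show (Pfun sets ((sets.length : Int) - 2).toNat).length = _
      rw [Pfun, show ((sets.length : Int) - 2).toNat + 1 = ((sets.length : Int) - 1).toNat by omega]
    · rw [if_neg (by simpa using hil)]
      rw [hP (i - 1) (by omega) (by omega), hS (i + 1) (by omega) (by omega)]
      have hPf : Pfun sets (i - 1).toNat = chainOf (sets.take i.toNat) := by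
        rw [Pfun, show (i - 1).toNat + 1 = i.toNat by omega]
      have hSf : Sfun sets (i + 1).toNat = chainOf ((sets.drop (i.toNat + 1)).reverse) := by
        rw [Sfun, show (i + 1).toNat = i.toNat + 1 by omega]
      rw [hPf, hSf, middle_eq (sets.take i.toNat) (sets.drop (i.toNat + 1))
        (by apply List.ne_nil_of_length_pos; simp only [List.length_take]; omega)
        (by apply List.ne_nil_of_length_pos; simp only [List.length_drop]; omega)]

-- ===== VERDICT (by name: the statement is the Claim_ definition above) =====
theorem max_intersection_spec : Claim_equal_max_intersection := by
  intro sets _ hpre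
  unfold Spec_max_intersection
  show max_intersection sets = max_intersection_alt sets
  by_cases hle : (sets.length : Int) ≤ 1
  · unfold max_intersection max_intersection_alt
    rw [if_pos hle, if_pos hle]
  · have hn : 2 ≤ sets.length := by omega
    have hA : max_intersection sets =
        ((PySem.List.pyRange 0 (sets.length : Int) 1).foldl (fun (st : Int × Int) i =>
          let temp : List Int :=
            if i == 0 then (pvMemo4 sets).getD (1, (sets.length : Int) - 1) []
            else if i == (sets.length : Int) - 1 then (pvMemo4 sets).getD (0, (sets.length : Int) - 2) []
            else pyInter ((pvMemo4 sets).getD (0, i - 1) [])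
              ((pvMemo4 sets).getD (i + 1, (sets.length : Int) - 1) [])
          if (temp.length : Int) > st.1 then ((temp.length : Int), i) else st) ((0 : Int), (0 : Int))).2 := by
      unfold max_intersection pvMemo4 pvMemo2 pvMemo1 pvMemo0
      rw [if_neg hle]
    have hB : max_intersection_alt sets =
        ((PySem.List.pyRange 0 (sets.length : Int) 1).foldl (fun (st : Int × Int) i =>
          let others := PySem.List.slice sets none (some i) ++ PySem.List.slice sets (some (i + 1)) none
          let inter : List Int := match others with
            | [] => []
            | h :: t => t.foldl pyInter h
          if (inter.length : Int) > st.1 then ((inter.length : Int), i) else st) ((0 : Int), (0 : Int))).2 := by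
      unfold max_intersection_alt
      rw [if_neg hle]
    rw [hA, hB]
    congr 1
    apply PySem.List.foldl_congr_mem
    intro st i hi
    rw [PySem.List.mem_pyRange_one] at hi
    have := step_eq sets hn hpre i hi.1 hi.2
    dsimp only
    rw [this]
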